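-- pv_equiv track=rewrite | github.com/rayz1065/competitive-programming | uva/introduction/time/dooms-day-algorithm/main.py | get_calendar
-- ===== SOURCE A (Python) =====
-- MONTH_DAYS = [0, 31, 28, 31, 30, 31, 30, 31, 31, 30, 31, 30, 31]
--
-- YEAR_DAYS = sum(MONTH_DAYS)
--
-- def is_leap (year):
--     return year % 400 == 0 or (year % 4 == 0 and year % 100 != 0)
--
-- def get_month_days (year, month):
--     if is_leap(year) and month == 2:
--         return MONTH_DAYS[month] + 1
--     return MONTH_DAYS[month]
--
-- def get_year_days (year):
--     return YEAR_DAYS + is_leap(year)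
--
-- def date_increment (year, month, date):
--     date += 1
--     if date <= get_month_days(year, month):
--         return year, month, date
--
--     month, date = month + 1, 1
--     if month <= 12:
--         return year, month, date
--
--     year, month = year + 1, 1
--     return year, month, date
--
-- def get_calendar (year, first_day):
--     calendar = [[None for _ in range(get_month_days(year, month) + 1)]
--                 for month, _ in enumerate(MONTH_DAYS)]
--
--     month, date = 1, 1
--     day = first_day
--     for _ in range(get_year_days(year)):
--         calendar[month][date] = day
--         year, month, date = date_increment(year, month, date)
--         day = day % 7 + 1
--
--     return calendar
-- ===== SOURCE B (Python) =====
-- MONTH_DAYS = [0, 31, 28, 31, 30, 31, 30, 31, 31, 30, 31, 30, 31]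
--
-- def get_calendar(year, first_day):
--     leap = year % 400 == 0 or (year % 4 == 0 and year % 100 != 0)
--     calendar = [[None]]
--     day = first_day
--     for month in range(1, 13):
--         n = MONTH_DAYS[month] + (1 if leap and month == 2 else 0)
--         row = [None]
--         for _ in range(n):
--             row.append(day)
--             day = day % 7 + 1
--         calendar.append(row)
--     return calendar
-- ===== Notes on version B (the rewrite author's own statement) =====
-- stated objective: simpler
-- what changed: A's flat 365/366-iteration state machine over (year, month, date) with the date_increment helper and a preallocated calendar mutated by index assignment is replaced by directly nested month/day loops that build each row by appending, threading only the running day counter.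
import Mathlib
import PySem

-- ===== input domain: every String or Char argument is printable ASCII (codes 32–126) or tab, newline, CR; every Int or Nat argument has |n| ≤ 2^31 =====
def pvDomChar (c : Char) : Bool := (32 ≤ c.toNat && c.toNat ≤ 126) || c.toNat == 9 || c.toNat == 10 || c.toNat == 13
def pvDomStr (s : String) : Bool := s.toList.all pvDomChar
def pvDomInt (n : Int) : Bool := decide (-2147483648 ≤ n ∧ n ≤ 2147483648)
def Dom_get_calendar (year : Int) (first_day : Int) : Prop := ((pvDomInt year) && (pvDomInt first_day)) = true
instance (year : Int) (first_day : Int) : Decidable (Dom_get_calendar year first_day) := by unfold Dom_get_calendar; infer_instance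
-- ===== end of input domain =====

-- B replaces A's flat 365/366-step state machine (with its date_increment helper and a
-- preallocated calendar mutated by index assignment) by directly nested month/day loops
-- that BUILD each row by appending; objective: simpler.

-- ===== PORT A =====
def monthDaysA : List Int := [0, 31, 28, 31, 30, 31, 30, 31, 31, 30, 31, 30, 31]

def isLeapA (year : Int) : Bool := year % 400 == 0 || (year % 4 == 0 && year % 100 != 0)

def getMonthDaysA (year month : Int) : Int :=
  if isLeapA year && month == 2 then monthDaysA.getD month.toNat 0 + 1
  else monthDaysA.getD month.toNat 0

-- YEAR_DAYS + is_leap(year): YEAR_DAYS = 365, the bool adds 0/1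
def getYearDaysA (year : Int) : Int := 365 + (if isLeapA year then 1 else 0)

def dateIncrementA (year month date : Int) : Int × Int × Int :=
  let date := date + 1
  if date ≤ getMonthDaysA year month then (year, month, date)
  else
    let month := month + 1
    let date : Int := 1
    if month ≤ 12 then (year, month, date)
    else (year + 1, 1, date)

-- one iteration of A's `for _ in range(get_year_days(year))` loop body
-- (indices month/date are always ≥ 1 and in range here, so `List.set` at `.toNat` is exact)
def stepA (st : List (List (Option Int)) × Int × Int × Int × Int) :
    List (List (Option Int)) × Int × Int × Int × Int :=
  let (cal, y, m, dt, day) := st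
  let cal := cal.set m.toNat ((cal.getD m.toNat []).set dt.toNat (some day))
  let (y, m, dt) := dateIncrementA y m dt
  (cal, y, m, dt, day % 7 + 1)

def get_calendar (year : Int) (first_day : Int) : List (List (Option Int)) :=
  let calendar := (PySem.List.enumerate monthDaysA).map
    (fun p => ((List.range (getMonthDaysA year p.1 + 1).toNat).map (fun _ => (none : Option Int))))
  let s := (List.range (getYearDaysA year).toNat).foldl (fun st _ => stepA st)
    (calendar, year, 1, 1, first_day)
  s.1

-- ===== PORT B =====
-- B's inner `for _ in range(n): row.append(day); day = day % 7 + 1`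
def bRow (leap : Bool) (month : Int) (day : Int) : List (Option Int) × Int :=
  let n := monthDaysA.getD month.toNat 0 + (if leap && month == 2 then 1 else 0)
  (List.range n.toNat).foldl (fun st _ => (st.1 ++ [some st.2], st.2 % 7 + 1)) ([none], day)

def get_calendar_alt (year : Int) (first_day : Int) : List (List (Option Int)) :=
  let leap := isLeapA year
  let s := (PySem.List.pyRange 1 13 1).foldl
    (fun (st : List (List (Option Int)) × Int) month =>
      let r := bRow leap month st.2
      (st.1 ++ [r.1], r.2))
    ([[(none : Option Int)]], first_day)
  s.1

-- ===== PRECONDITION & SPEC =====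
def Spec_get_calendar (year : Int) (first_day : Int) (out : List (List (Option Int))) : Prop := out = get_calendar_alt year first_day
instance (year : Int) (first_day : Int) (out : List (List (Option Int))) : Decidable (Spec_get_calendar year first_day out) := by unfold Spec_get_calendar; infer_instance

-- ===== CLAIM (what is proved, stated in full; the proofs are below) =====
def Claim_equal_get_calendar : Prop := ∀ (year : Int) (first_day : Int), Dom_get_calendar year first_day → Spec_get_calendar year first_day (get_calendar year first_day)

-- ===== LEMMAS AND PROOFS =====

-- the stream of day-of-week values: d, d%7+1, (d%7+1)%7+1, …
def daysList (d : Int) : Nat → List Int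
  | 0 => []
  | j+1 => d :: daysList (d % 7 + 1) j

def iterDay (d : Int) : Nat → Int
  | 0 => d
  | j+1 => iterDay (d % 7 + 1) j

-- the fresh (all-None) rows for months m, m+1, …, m+c-1
def freshRows (y : Int) (m : Int) : Nat → List (List (Option Int))
  | 0 => []
  | c+1 => List.replicate ((getMonthDaysA y m).toNat + 1) none :: freshRows y (m+1) c

def totDays (y : Int) (m : Int) : Nat → Nat
  | 0 => 0
  | c+1 => (getMonthDaysA y m).toNat + totDays y (m+1) c

-- B's rows for months m, …, m+c-1 together with the final day counter
def bRowsList (leap : Bool) (m d : Int) : Nat → List (List (Option Int)) × Int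
  | 0 => ([], d)
  | c+1 =>
    let r := bRow leap m d
    let rest := bRowsList leap (m+1) r.2 c
    (r.1 :: rest.1, rest.2)

lemma foldl_range_const {α : Type} (g : α → α) (n : Nat) (s : α) :
    (List.range n).foldl (fun st _ => g st) s = g^[n] s := by
  induction n with
  | zero => rfl
  | succ n ih => rw [List.range_succ, List.foldl_append, ih, Function.iterate_succ_apply']; rfl

lemma set_append_len {α : Type} (pre : List α) (x v : α) (rest : List α) :
    (pre ++ x :: rest).set pre.length v = pre ++ v :: rest := by
  induction pre with
  | nil => rfl
  | cons a t ih => simp [ih]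

lemma getD_append_len {α : Type} (pre : List α) (x : α) (rest : List α) (d : α) :
    (pre ++ x :: rest).getD pre.length d = x := by
  induction pre with
  | nil => rfl
  | cons a t ih => simp only [List.cons_append, List.length_cons]; exact ih

lemma getD_set_self {α : Type} (l : List α) (i : Nat) (v d : α) (h : i < l.length) :
    (l.set i v).getD i d = v := by
  simp [List.getD, h]

lemma daysList_succ (d : Int) (j : Nat) :
    daysList d (j+1) = daysList d j ++ [iterDay d j] := by
  induction j generalizing d with
  | zero => rfl
  | succ j ih =>
      calc daysList d (j+1+1) = d :: daysList (d % 7 + 1) (j+1) := rfl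
        _ = d :: (daysList (d % 7 + 1) j ++ [iterDay (d % 7 + 1) j]) := by rw [ih]
        _ = daysList d (j+1) ++ [iterDay d (j+1)] := rfl

lemma iterDay_succ (d : Int) (j : Nat) :
    iterDay d (j+1) = iterDay d j % 7 + 1 := by
  induction j generalizing d with
  | zero => rfl
  | succ j ih =>
      calc iterDay d (j+1+1) = iterDay (d % 7 + 1) (j+1) := rfl
        _ = iterDay (d % 7 + 1) j % 7 + 1 := by rw [ih]
        _ = iterDay d (j+1) % 7 + 1 := rfl

lemma bfold (j : Nat) (acc : List (Option Int)) (d : Int) :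
    (List.range j).foldl (fun st _ => (st.1 ++ [some st.2], st.2 % 7 + 1)) (acc, d)
      = (acc ++ (daysList d j).map some, iterDay d j) := by
  induction j with
  | zero => simp [daysList, iterDay]
  | succ j ih =>
      rw [List.range_succ, List.foldl_append, ih]
      simp [daysList_succ, iterDay_succ]

lemma getMonthDaysA_eq (y m : Int) :
    getMonthDaysA y m = monthDaysA.getD m.toNat 0 + (if isLeapA y && m == 2 then 1 else 0) := by
  unfold getMonthDaysA; split <;> simp [*]

lemma bRow_eq (y m d : Int) :
    bRow (isLeapA y) m d
      = (none :: (daysList d (getMonthDaysA y m).toNat).map some,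
         iterDay d (getMonthDaysA y m).toNat) := by
  unfold bRow
  rw [← getMonthDaysA_eq]
  simpa using bfold (getMonthDaysA y m).toNat [none] d

lemma getMonthDaysA_pos (y m : Int) (h1 : 1 ≤ m) (h2 : m ≤ 12) : 1 ≤ getMonthDaysA y m := by
  interval_cases m <;> unfold getMonthDaysA <;> simp [monthDaysA] <;> (try split) <;> norm_num

lemma monthRun (y m : Int) (_hm1 : 1 ≤ m) (_hm2 : m ≤ 12) (n : Nat)
    (hn : getMonthDaysA y m = (n : Int)) :
    ∀ (j' : Nat), j' + 1 ≤ n →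
    ∀ (d : Int) (cal : List (List (Option Int))) (pre : List (Option Int)),
      m.toNat < cal.length →
      cal.getD m.toNat [] = pre ++ List.replicate (j'+1) none →
      pre.length = n - j' →
      stepA^[j'+1] (cal, y, m, ((n - j' : Nat) : Int), d)
        = (cal.set m.toNat (pre ++ (daysList d (j'+1)).map some),
           (if m + 1 ≤ 12 then y else y + 1), (if m + 1 ≤ 12 then m + 1 else 1), 1,
           iterDay d (j'+1)) := by
  intro j'
  induction j' with
  | zero =>
      intro hj d cal pre hlen hrow hpre
      simp only [Nat.zero_add, Nat.sub_zero] at hrow hpre ⊢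
      rw [Function.iterate_one]
      have hng : ¬ (((n : Nat) : Int) + 1 ≤ getMonthDaysA y m) := by rw [hn]; omega
      simp only [stepA, dateIncrementA, hrow, List.replicate_one]
      rw [show ((n : Nat) : Int).toNat = pre.length by omega]
      rw [set_append_len]
      simp only [if_neg hng]
      split_ifs <;> simp [daysList, iterDay]
  | succ j' ih =>
      intro hj d cal pre hlen hrow hpre
      rw [Function.iterate_succ_apply]
      have hle : ((n - (j' + 1) : Nat) : Int) + 1 ≤ getMonthDaysA y m := by rw [hn]; omega
      have hstep : stepA (cal, y, m, ((n - (j' + 1) : Nat) : Int), d)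
          = (cal.set m.toNat ((pre ++ [some d]) ++ List.replicate (j' + 1) none), y, m,
             ((n - (j' + 1) : Nat) : Int) + 1, d % 7 + 1) := by
        simp only [stepA, dateIncrementA, hrow, if_pos hle]
        rw [show ((n - (j' + 1) : Nat) : Int).toNat = pre.length by omega]
        rw [List.replicate_succ, set_append_len]
        simp
      rw [hstep, show ((n - (j' + 1) : Nat) : Int) + 1 = ((n - j' : Nat) : Int) by omega]
      rw [ih (by omega) (d % 7 + 1) _ (pre ++ [some d])
        (by simpa using hlen)
        (by rw [getD_set_self _ _ _ _ hlen, List.append_assoc])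
        (by simp only [List.length_append, List.length_cons, List.length_nil, hpre]; omega)]
      rw [List.set_set]
      have hdl : (pre ++ [some d]) ++ (daysList (d % 7 + 1) (j' + 1)).map some
          = pre ++ (daysList d (j' + 1 + 1)).map some := by
        rw [List.append_assoc]
        rfl
      rw [hdl]
      rfl

lemma runA (y : Int) :
    ∀ (c : Nat) (m : Int), 1 ≤ c → c ≤ 12 → m = 13 - (c : Int) →
    ∀ (acc : List (List (Option Int))) (d : Int), acc.length = m.toNat →
      stepA^[totDays y m c] (acc ++ freshRows y m c, y, m, 1, d)
        = (acc ++ (bRowsList (isLeapA y) m d c).1, y + 1, 1, 1,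
           (bRowsList (isLeapA y) m d c).2) := by
  intro c
  induction c with
  | zero => intro m h1 _ _ _ _ _; exact absurd h1 (by norm_num)
  | succ c ih =>
      intro m _ hc hm acc d hacc
      have hm1 : 1 ≤ m := by omega
      have hm2 : m ≤ 12 := by omega
      have hpos := getMonthDaysA_pos y m hm1 hm2
      obtain ⟨n, hn⟩ : ∃ n : Nat, getMonthDaysA y m = (n : Int) :=
        ⟨(getMonthDaysA y m).toNat, (Int.toNat_of_nonneg (by omega)).symm⟩
      have hn1 : 1 ≤ n := by omega
      have htoN : (getMonthDaysA y m).toNat = n := by omega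
      have hmonth := monthRun y m hm1 hm2 n hn (n - 1) (by omega) d
        (acc ++ List.replicate (n + 1) none :: freshRows y (m + 1) c) [none]
        (by simp only [List.length_append, List.length_cons]; omega)
        (by rw [show m.toNat = acc.length by omega, getD_append_len,
              show n - 1 + 1 = n by omega, List.replicate_succ]; rfl)
        (by simp only [List.length_cons, List.length_nil]; omega)
      rw [show ((n - (n - 1) : Nat) : Int) = 1 by omega, show n - 1 + 1 = n by omega,
        show m.toNat = acc.length by omega, set_append_len] at hmonth
      have hunf : totDays y m (c + 1) = totDays y (m + 1) c + n := by
        simp only [totDays, htoN]; omega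
      have hbrow := bRow_eq y m d
      rw [htoN] at hbrow
      rw [show freshRows y m (c + 1) = List.replicate (n + 1) none :: freshRows y (m + 1) c
            from by simp [freshRows, htoN]]
      rw [hunf, Function.iterate_add_apply, hmonth]
      rw [show bRowsList (isLeapA y) m d (c + 1)
            = ((bRow (isLeapA y) m d).1 :: (bRowsList (isLeapA y) (m + 1) (bRow (isLeapA y) m d).2 c).1,
               (bRowsList (isLeapA y) (m + 1) (bRow (isLeapA y) m d).2 c).2) from rfl]
      rw [hbrow]
      rcases Nat.eq_zero_or_pos c with hc0 | hc1
      · subst hc0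
        have h12 : m = 12 := by omega
        subst h12
        simp [totDays, freshRows, bRowsList]
      · have hle12 : m + 1 ≤ 12 := by omega
        have h := ih (m + 1) hc1 (by omega) (by omega)
          (acc ++ [none :: (daysList d n).map some]) (iterDay d n)
          (by simp only [List.length_append, List.length_cons, List.length_nil]; omega)
        simp only [List.append_assoc, List.cons_append, List.nil_append] at h ⊢
        rw [if_pos hle12, if_pos hle12]
        exact h

lemma runB (leap : Bool) :
    ∀ (c : Nat) (m : Int), c ≤ 12 → m = 13 - (c : Int) →
    ∀ (acc : List (List (Option Int))) (d : Int),
      (PySem.List.pyRange m 13 1).foldl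
        (fun (st : List (List (Option Int)) × Int) month =>
          let r := bRow leap month st.2
          (st.1 ++ [r.1], r.2)) (acc, d)
        = (acc ++ (bRowsList leap m d c).1, (bRowsList leap m d c).2) := by
  intro c
  induction c with
  | zero =>
      intro m _ hm acc d
      have h13 : m = 13 := by omega
      subst h13
      simp [PySem.List.pyRange, bRowsList]
  | succ c ih =>
      intro m hc hm acc d
      have hlt : m < 13 := by omega
      rw [PySem.List.pyRange_one_cons hlt, List.foldl_cons]
      rw [ih (m + 1) (by omega) (by omega)]
      simp [bRowsList]

lemma init_cal (y : Int) :
    (PySem.List.enumerate monthDaysA).map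
      (fun p => ((List.range (getMonthDaysA y p.1 + 1).toNat).map (fun _ => (none : Option Int))))
      = [[(none : Option Int)]] ++ freshRows y 1 12 := by
  cases hb : isLeapA y <;>
    simp [PySem.List.enumerate, freshRows, getMonthDaysA, hb, monthDaysA,
      List.replicate_succ]

lemma tot_eq (y : Int) : (getYearDaysA y).toNat = totDays y 1 12 := by
  cases hb : isLeapA y <;>
    simp [getYearDaysA, totDays, getMonthDaysA, hb, monthDaysA]

lemma main_eq (y f : Int) : get_calendar y f = get_calendar_alt y f := by
  simp only [get_calendar, get_calendar_alt, foldl_range_const, tot_eq, init_cal]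
  rw [runA y 12 1 (by norm_num) (by norm_num) (by norm_num) [[none]] f (by simp),
    runB (isLeapA y) 12 1 (by norm_num) (by norm_num) [[none]] f]

-- ===== VERDICT (by name: the statement is the Claim_ definition above) =====
theorem get_calendar_spec : Claim_equal_get_calendar := by
  intro y f _
  unfold Spec_get_calendar
  exact main_eq y f
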